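-- pv_equiv track=rewrite | github.com/aswanthabam/Crypta-Quest-Problems | decrypt.py | remove_prime_chars
-- ===== SOURCE A (Python) =====
-- def is_prime(number):
--     if number < 2:
--         return False
--     for i in range(2, int(number**0.5) + 1):
--         if number % i == 0:
--             return False
--     return True
--
-- def remove_prime_chars(msg:str) -> str:
--     res = ''
--     i = 0
--     while i < len(msg):
--         i += 1
--         if not is_prime(i):
--             res += msg[i  -1 ]
--     return res
-- ===== SOURCE B (Python) =====
-- def remove_prime_chars(msg: str) -> str:
--     n = len(msg)
--     comp = [False] * (n + 1)  # comp[k] == True  <=>  2 <= k <= n and k is composite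
--     for i in range(2, n + 1):
--         for j in range(2, n // i + 1):
--             comp[i * j] = True
--     return ''.join(c for k, c in enumerate(msg, 1) if k < 2 or comp[k])
-- ===== Notes on version B (the rewrite author's own statement) =====
-- stated objective: faster
-- what changed: Replaces per-position trial-division primality testing with one sieve marking all composite positions up front, then a single filtering join.
import Mathlib
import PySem

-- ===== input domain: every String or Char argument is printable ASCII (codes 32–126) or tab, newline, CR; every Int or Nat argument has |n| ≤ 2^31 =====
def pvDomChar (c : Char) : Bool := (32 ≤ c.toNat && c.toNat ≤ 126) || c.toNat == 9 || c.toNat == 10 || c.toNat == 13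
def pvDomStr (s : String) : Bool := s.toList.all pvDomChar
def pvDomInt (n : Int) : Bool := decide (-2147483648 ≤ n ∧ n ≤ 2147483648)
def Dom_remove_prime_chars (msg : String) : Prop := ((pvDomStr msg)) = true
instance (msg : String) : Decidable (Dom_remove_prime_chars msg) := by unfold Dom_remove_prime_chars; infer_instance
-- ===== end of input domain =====

-- B replaces A's per-position trial-division primality test with one sieve that marks all
-- composite positions up front, then a single filtering join (measured faster at large sizes).

-- ===== PORT A =====
-- is_prime: 'int(number**0.5)' is ported as Nat.sqrt, exact for the magnitudes reached here
-- (number ≤ len(msg), far below where float sqrt and integer sqrt diverge);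
-- the early-return for-loop is the List.all of its test.
def pvIsPrimeA (number : Int) : Bool :=
  if number < 2 then false
  else
    (PySem.List.pyRange 2 (((Nat.sqrt number.toNat : Nat) : Int) + 1) 1).all
      (fun i => !(PySem.Int.mod number i == 0))

-- the while loop of A: i counts up; msg[i-1] is always in range (0 ≤ i-1 < len), so pyGet?.getD
def pvALoop (cs : List Char) (res : List Char) (i : Nat) : List Char :=
  if i < cs.length then
    pvALoop cs
      (if !pvIsPrimeA ((i + 1 : Nat) : Int) then
        res ++ [(PySem.List.pyGet? cs (((i + 1 : Nat) : Int) - 1)).getD default]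
      else res)
      (i + 1)
  else res
termination_by cs.length - i

def remove_prime_chars (msg : String) : String :=
  String.mk (pvALoop msg.toList [] 0)

-- ===== PORT B =====
-- comp = [False]*(n+1); for i in range(2, n+1): for j in range(2, n//i+1): comp[i*j] = True
def pvSieve (n : Nat) : List Bool :=
  (PySem.List.pyRange 2 ((n : Int) + 1) 1).foldl
    (fun comp i =>
      (PySem.List.pyRange 2 (PySem.Int.floordiv (n : Int) i + 1) 1).foldl
        (fun comp j => comp.set (i * j).toNat true) comp)
    (List.replicate (n + 1) false)

-- ''.join(c for k, c in enumerate(msg, 1) if k < 2 or comp[k])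
def remove_prime_chars_alt (msg : String) : String :=
  let cs := msg.toList
  let comp := pvSieve cs.length
  String.mk (((PySem.List.enumerate cs 1).filter
      (fun p => decide (p.1 < 2) || comp.getD p.1.toNat false)).map Prod.snd)

-- ===== PRECONDITION & SPEC =====
def Spec_remove_prime_chars (msg : String) (out : String) : Prop := out = remove_prime_chars_alt msg
instance (msg : String) (out : String) : Decidable (Spec_remove_prime_chars msg out) := by unfold Spec_remove_prime_chars; infer_instance

-- ===== CLAIM (what is proved, stated in full; the proofs are below) =====
def Claim_equal_remove_prime_chars : Prop := ∀ (msg : String), Dom_remove_prime_chars msg → Spec_remove_prime_chars msg (remove_prime_chars msg)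

-- ===== LEMMAS AND PROOFS =====

-- A's trial division computes primality of the (positive) position
lemma pvIsPrimeA_eq (k : Int) (hk : 1 ≤ k) : pvIsPrimeA k = decide (Nat.Prime k.toNat) := by
  unfold pvIsPrimeA
  by_cases h2 : k < 2
  · have : k = 1 := by omega
    subst this
    simp [Nat.prime_def_lt]
  · simp only [if_neg h2]
    have hkn : k = (k.toNat : Int) := by omega
    rw [Bool.eq_iff_iff]
    simp only [List.all_eq_true, PySem.List.mem_pyRange_one, Bool.not_eq_eq_eq_not,
      Bool.not_true, beq_eq_false_iff_ne, ne_eq, decide_eq_true_eq]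
    rw [Nat.prime_def_le_sqrt]
    constructor
    · intro h
      refine ⟨by omega, fun m hm hms hdvd => ?_⟩
      apply h (m : Int) ⟨by exact_mod_cast hm, by omega⟩
      rw [PySem.Int.mod_eq_zero_iff_dvd, hkn]
      exact_mod_cast hdvd
    · rintro ⟨-, h⟩ i ⟨hi2, hisq⟩ hmod
      rw [PySem.Int.mod_eq_zero_iff_dvd] at hmod
      refine h i.toNat (by omega) (by omega) ?_
      have hin : i = (i.toNat : Int) := by omega
      rw [hin, hkn] at hmod
      exact_mod_cast hmod

-- accumulator of A's loop splits off
lemma pvALoop_append (cs : List Char) (k : Nat) : ∀ i res, cs.length - i ≤ k →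
    pvALoop cs res i = res ++ pvALoop cs [] i := by
  induction k with
  | zero =>
    intro i res h
    have hi : ¬ i < cs.length := by omega
    conv_lhs => rw [pvALoop]
    conv_rhs => rw [pvALoop]
    simp [hi]
  | succ k ih =>
    intro i res h
    by_cases hi : i < cs.length
    · conv_lhs => rw [pvALoop]
      conv_rhs => rw [pvALoop]
      simp only [if_pos hi]
      conv_rhs => rw [ih (i+1) _ (by omega)]
      rw [ih (i+1) _ (by omega)]
      split <;> simp
    · conv_lhs => rw [pvALoop]
      conv_rhs => rw [pvALoop]
      simp [hi]

-- A's loop from position i is the filtered tail of enumerate(msg, 1)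
lemma pvALoop_suffix (cs : List Char) (k : Nat) : ∀ i, cs.length - i ≤ k →
    pvALoop cs [] i =
      (((PySem.List.enumerate cs 1).drop i).filter (fun p => !pvIsPrimeA p.1)).map Prod.snd := by
  induction k with
  | zero =>
    intro i h
    have hi : ¬ i < cs.length := by omega
    rw [pvALoop]
    rw [List.drop_eq_nil_of_le (by simp [PySem.List.length_enumerate]; omega)]
    simp [hi]
  | succ k ih =>
    intro i h
    by_cases hi : i < cs.length
    · rw [pvALoop]
      simp only [if_pos hi]
      rw [pvALoop_append cs k (i+1) _ (by omega), ih (i+1) (by omega)]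
      have hlen : i < (PySem.List.enumerate cs 1).length := by
        simp [PySem.List.length_enumerate]; omega
      rw [← List.getElem_cons_drop hlen]
      rw [PySem.List.getElem_enumerate]
      rw [List.filter_cons]
      by_cases hp : pvIsPrimeA ((i : Int) + 1) = true
      · have hp' : pvIsPrimeA (1 + (i : Int)) = true := by rwa [add_comm]
        simp [hp, hp']
      · simp only [Bool.not_eq_true] at hp
        have hp' : pvIsPrimeA (1 + (i : Int)) = false := by rwa [add_comm]
        simp [hp, hp', List.getElem?_eq_getElem hi]
    · rw [pvALoop]
      rw [List.drop_eq_nil_of_le (by simp [PySem.List.length_enumerate]; omega)]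
      simp [hi]

lemma pvALoop_eq (cs : List Char) :
    pvALoop cs [] 0 =
      ((PySem.List.enumerate cs 1).filter (fun p => !pvIsPrimeA p.1)).map Prod.snd := by
  simpa using pvALoop_suffix cs cs.length 0 (by omega)

-- a fold of in-bounds list-set updates preserves length
lemma pvSetFold_length (f : Int → Nat) : ∀ (l : List Int) (comp : List Bool),
    (l.foldl (fun c j => c.set (f j) true) comp).length = comp.length := by
  intro l
  induction l with
  | nil => intro comp; rfl
  | cons j l ih => intro comp; rw [List.foldl_cons, ih]; simp

-- entry m after a fold of in-bounds list-set updates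
lemma pvSetFold_getD (f : Int → Nat) : ∀ (l : List Int) (comp : List Bool) (m : Nat),
    (∀ j ∈ l, f j < comp.length) →
    (l.foldl (fun c j => c.set (f j) true) comp).getD m false =
      (comp.getD m false || l.any (fun j => f j == m)) := by
  intro l
  induction l with
  | nil => intro comp m _; simp
  | cons j l ih =>
    intro comp m hb
    rw [List.foldl_cons, ih _ m (by intro x hx; simpa using hb x (List.mem_cons_of_mem _ hx))]
    have hj : f j < comp.length := hb j List.mem_cons_self
    by_cases hm : f j = m
    · subst hm
      simp [List.getD_eq_getElem?_getD, hj]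
    · have hfm : (f j == m) = false := by simpa using hm
      simp [List.getD_eq_getElem?_getD, List.getElem?_set_ne hm, hfm]

-- entry m of the nested sieve fold = initial value ∨ some i*j hits m
lemma pvSieveFold_getD (n : Nat) : ∀ (li : List Int) (comp : List Bool) (m : Nat),
    comp.length = n + 1 →
    (∀ i ∈ li, 2 ≤ i ∧ i ≤ (n : Int)) →
    ((li.foldl
      (fun comp i =>
        (PySem.List.pyRange 2 (PySem.Int.floordiv (n : Int) i + 1) 1).foldl
          (fun comp j => comp.set (i * j).toNat true) comp)
      comp).getD m false) =
      (comp.getD m false || li.any (fun i =>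
        (PySem.List.pyRange 2 (PySem.Int.floordiv (n : Int) i + 1) 1).any
          (fun j => (i * j).toNat == m))) := by
  intro li
  induction li with
  | nil => intro comp m _ _; simp
  | cons i li ih =>
    intro comp m hlen hmem
    obtain ⟨hi2, hin⟩ := hmem i List.mem_cons_self
    have hbound : ∀ j ∈ PySem.List.pyRange 2 (PySem.Int.floordiv (n : Int) i + 1) 1,
        (i * j).toNat < comp.length := by
      intro j hj
      rw [PySem.List.mem_pyRange_one] at hj
      have hfd : PySem.Int.floordiv (n : Int) i = (n : Int) / i :=
        PySem.Int.floordiv_eq_ediv_of_pos (by omega)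
      rw [hfd] at hj
      have hji : j * i ≤ (n : Int) := (Int.le_ediv_iff_mul_le (by omega)).mp (by omega)
      have hij : i * j ≤ (n : Int) := by rw [mul_comm]; exact hji
      omega
    rw [List.foldl_cons,
      ih _ m (by rw [pvSetFold_length]; exact hlen)
        (fun x hx => hmem x (List.mem_cons_of_mem _ hx)),
      pvSetFold_getD _ _ _ m hbound]
    simp [Bool.or_assoc]

-- the sieve marks exactly the composite positions 2..n
lemma pvSieve_getD (n m : Nat) (hm : m ≤ n) :
    (pvSieve n).getD m false = decide (2 ≤ m ∧ ¬ Nat.Prime m) := by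
  unfold pvSieve
  rw [pvSieveFold_getD n _ _ m (by simp)
    (by intro i hi; rw [PySem.List.mem_pyRange_one] at hi; omega)]
  have hrep : (List.replicate (n + 1) false).getD m false = false := by
    have hlt : m < n + 1 := by omega
    simp [List.getD_eq_getElem?_getD, hlt]
  rw [hrep, Bool.false_or, Bool.eq_iff_iff]
  simp only [List.any_eq_true, PySem.List.mem_pyRange_one, beq_iff_eq, decide_eq_true_eq]
  constructor
  · rintro ⟨i, ⟨hi2, hin⟩, j, ⟨hj2, hjb⟩, hij⟩
    have hfd : PySem.Int.floordiv (n : Int) i = (n : Int) / i :=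
      PySem.Int.floordiv_eq_ediv_of_pos (by omega)
    rw [hfd] at hjb
    have hji : j * i ≤ (n : Int) := (Int.le_ediv_iff_mul_le (by omega)).mp (by omega)
    have hi' : ((i.toNat : Nat) : Int) = i := by omega
    have hj' : ((j.toNat : Nat) : Int) = j := by omega
    have hij' : ((i.toNat * j.toNat : Nat) : Int) = i * j := by push_cast; rw [hi', hj']
    have hm' : m = i.toNat * j.toNat := by omega
    constructor
    · have h22 : (2:Nat) ≤ i.toNat ∧ (2:Nat) ≤ j.toNat := by omega
      calc (2:Nat) ≤ 2 * 2 := by norm_num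
      _ ≤ i.toNat * j.toNat := Nat.mul_le_mul h22.1 h22.2
      _ = m := hm'.symm
    · intro hp
      have hdvd : i.toNat ∣ m := ⟨j.toNat, hm'⟩
      rcases (hp.eq_one_or_self_of_dvd _ hdvd) with h1 | hs
      · omega
      · have hj2' : 2 ≤ j.toNat := by omega
        have hmm : m = m * j.toNat := by rw [hs] at hm'; exact hm'
        nlinarith [hp.two_le, hmm, hj2']
  · rintro ⟨hm2, hnp⟩
    obtain ⟨d, hdvd, hd2, hdm⟩ := Nat.exists_dvd_of_not_prime2 hm2 hnp
    obtain ⟨e, he⟩ := hdvd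
    have he2 : 2 ≤ e := by nlinarith
    refine ⟨(d : Int), ⟨by omega, by omega⟩, (e : Int), ⟨by omega, ?_⟩, by omega⟩
    have hfd : PySem.Int.floordiv (n : Int) (d : Int) = (n : Int) / d :=
      PySem.Int.floordiv_eq_ediv_of_pos (by omega)
    rw [hfd]
    have hen : (e : Int) * d ≤ (n : Int) := by exact_mod_cast Nat.le_trans (by nlinarith) hm
    have := (Int.le_ediv_iff_mul_le (c := (d:Int)) (by omega)).mpr hen
    omega

-- ===== VERDICT (by name: the statement is the Claim_ definition above) =====
theorem remove_prime_chars_spec : Claim_equal_remove_prime_chars := by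
  unfold Claim_equal_remove_prime_chars Spec_remove_prime_chars
  intro msg _
  unfold remove_prime_chars remove_prime_chars_alt
  rw [pvALoop_eq]
  simp only []
  congr 1
  apply congrArg
  apply List.filter_congr
  intro p hp
  rw [PySem.List.mem_enumerate_iff] at hp
  obtain ⟨k, hk, rfl⟩ := hp
  simp only
  have h1 : (1 : Int) ≤ 1 + (k : Int) := by omega
  rw [pvIsPrimeA_eq _ h1]
  have htn : ((1 : Int) + (k : Int)).toNat = k + 1 := by omega
  rw [htn, pvSieve_getD msg.toList.length (k + 1) (by omega)]
  by_cases h2 : k = 0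
  · subst h2
    simp [Nat.prime_def_lt]
  · have hge : ¬ ((1 : Int) + (k : Int) < 2) := by omega
    by_cases hpr : Nat.Prime (k + 1) <;> simp [hge, hpr] <;> omega
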